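-- pv_equiv track=rewrite | github.com/HarrisonScarfone/aoc-2024 | day_12/main.py | count_interior_corners
-- ===== SOURCE A (Python) =====
-- def count_interior_corners(wall_dirs):
--     if len(wall_dirs) in [0, 1]:
--         return 0
--     if len(wall_dirs) == 2:
--         if wall_dirs[0] in [1, 3] and wall_dirs[1] in [2, 4]:
--             return 1
--         elif wall_dirs[0] in [2, 4] and wall_dirs[1] in [1, 3]:
--             return 1
--         else:
--             return 0
--     return (count_interior_corners([wall_dirs[0], wall_dirs[1]]) +
--             count_interior_corners([wall_dirs[0], wall_dirs[2]]) +
--             count_interior_corners([wall_dirs[1], wall_dirs[2]]))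
-- ===== SOURCE B (Python) =====
-- from itertools import combinations
--
--
-- def count_interior_corners(wall_dirs):
--     return sum(
--         1
--         for a, b in combinations(wall_dirs[:3], 2)
--         if (a in (1, 3) and b in (2, 4)) or (a in (2, 4) and b in (1, 3))
--     )
-- ===== Notes on version B (the rewrite author's own statement) =====
-- stated objective: simpler
-- what changed: Replaced the recursion on rebuilt 2-element sublists by a single flat count over the 2-element combinations of the first three directions.
import Mathlib
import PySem

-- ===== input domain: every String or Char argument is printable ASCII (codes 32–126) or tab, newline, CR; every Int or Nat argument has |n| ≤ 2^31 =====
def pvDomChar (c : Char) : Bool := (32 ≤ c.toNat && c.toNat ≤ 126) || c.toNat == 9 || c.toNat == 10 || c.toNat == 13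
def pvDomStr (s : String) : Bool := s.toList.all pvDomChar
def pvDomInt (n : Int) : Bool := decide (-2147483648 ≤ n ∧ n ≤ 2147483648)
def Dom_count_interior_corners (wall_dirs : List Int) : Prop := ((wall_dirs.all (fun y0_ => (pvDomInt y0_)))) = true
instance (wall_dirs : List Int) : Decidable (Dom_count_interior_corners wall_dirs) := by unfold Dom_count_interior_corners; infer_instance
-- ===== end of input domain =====

-- B replaces A's recursion on rebuilt 2-element sublists by one flat count over
-- the 2-element combinations of wall_dirs[:3] (objective: simpler).


-- ===== PORT A =====
def count_interior_corners (wall_dirs : List Int) : Int :=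
  if wall_dirs.length = 0 ∨ wall_dirs.length = 1 then 0
  else if wall_dirs.length = 2 then
    let w0 := (PySem.List.pyGet? wall_dirs 0).getD 0   -- index in range: length = 2
    let w1 := (PySem.List.pyGet? wall_dirs 1).getD 0
    if (w0 = 1 ∨ w0 = 3) ∧ (w1 = 2 ∨ w1 = 4) then 1
    else if (w0 = 2 ∨ w0 = 4) ∧ (w1 = 1 ∨ w1 = 3) then 1
    else 0
  else
    let w0 := (PySem.List.pyGet? wall_dirs 0).getD 0   -- index in range: length ≥ 3
    let w1 := (PySem.List.pyGet? wall_dirs 1).getD 0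
    let w2 := (PySem.List.pyGet? wall_dirs 2).getD 0
    count_interior_corners [w0, w1] + count_interior_corners [w0, w2] +
      count_interior_corners [w1, w2]
termination_by wall_dirs.length
decreasing_by all_goals (simp only [List.length_cons, List.length_nil]; omega)

-- ===== PORT B =====
-- itertools.combinations(xs, 2), in order
def pvComb2 : List Int → List (Int × Int)
  | [] => []
  | x :: xs => xs.map (fun y => (x, y)) ++ pvComb2 xs

def pvIsCorner (p : Int × Int) : Bool :=
  ((p.1 == 1 || p.1 == 3) && (p.2 == 2 || p.2 == 4)) ||
  ((p.1 == 2 || p.1 == 4) && (p.2 == 1 || p.2 == 3))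

def count_interior_corners_alt (wall_dirs : List Int) : Int :=
  ((pvComb2 (PySem.List.slice wall_dirs none (some 3))).countP pvIsCorner : Nat)

-- ===== PRECONDITION & SPEC =====
def Spec_count_interior_corners (wall_dirs : List Int) (out : Int) : Prop := out = count_interior_corners_alt wall_dirs
instance (wall_dirs : List Int) (out : Int) : Decidable (Spec_count_interior_corners wall_dirs out) := by unfold Spec_count_interior_corners; infer_instance

-- ===== CLAIM (what is proved, stated in full; the proofs are below) =====
def Claim_equal_count_interior_corners : Prop := ∀ (wall_dirs : List Int), Dom_count_interior_corners wall_dirs → Spec_count_interior_corners wall_dirs (count_interior_corners wall_dirs)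

-- ===== LEMMAS AND PROOFS =====

theorem pair_eq (a b : Int) :
    count_interior_corners [a, b] = if pvIsCorner (a, b) then 1 else 0 := by
  rw [count_interior_corners]
  simp [PySem.List.pyGet?, PySem.List.pyIdx?, pvIsCorner]
  split_ifs <;> first | (simp_all; tauto) | simp_all

-- ===== VERDICT (by name: the statement is the Claim_ definition above) =====
theorem count_interior_corners_spec : Claim_equal_count_interior_corners := by
  intro wall_dirs _
  unfold Spec_count_interior_corners count_interior_corners_alt
  match wall_dirs with
  | [] => rw [count_interior_corners]; simp [pvComb2, PySem.List.slice]
  | [a] => rw [count_interior_corners]; simp [pvComb2, PySem.List.slice]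
  | [a, b] =>
      rw [pair_eq]
      have h : PySem.List.slice [a, b] none (some 3) = [a, b] := by
        rw [show (3 : Int) = ((3 : Nat) : Int) from rfl, PySem.List.slice_to_natCast]
        simp
      rw [h]
      cases h1 : pvIsCorner (a, b) <;> simp [pvComb2, List.countP, List.countP.go, h1]
  | a :: b :: c :: rest =>
      rw [count_interior_corners]
      rw [if_neg (by simp), if_neg (by simp)]
      have h : PySem.List.slice (a :: b :: c :: rest) none (some 3) = [a, b, c] := by
        rw [show (3 : Int) = ((3 : Nat) : Int) from rfl, PySem.List.slice_to_natCast]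
        simp
      rw [h]
      have g0 : (PySem.List.pyGet? (a :: b :: c :: rest) 0).getD 0 = a := by
        rw [PySem.List.pyGet?_zero_cons]; rfl
      have g1 : (PySem.List.pyGet? (a :: b :: c :: rest) 1).getD 0 = b := by
        rw [show (1 : Int) = ((1 : Nat) : Int) from rfl, PySem.List.pyGet?_natCast]; simp
      have g2 : (PySem.List.pyGet? (a :: b :: c :: rest) 2).getD 0 = c := by
        rw [show (2 : Int) = ((2 : Nat) : Int) from rfl, PySem.List.pyGet?_natCast]; simp
      simp only [g0, g1, g2]
      rw [pair_eq, pair_eq, pair_eq]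
      simp only [pvComb2, List.map, List.countP_cons, List.countP_nil, List.append_nil,
        List.cons_append, List.nil_append]
      cases h1 : pvIsCorner (a, b) <;> cases h2 : pvIsCorner (a, c) <;>
        cases h3 : pvIsCorner (b, c) <;> simp
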